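-- pv_equiv track=rewrite | github.com/des3bd/AREEj-PEPs-extension | code/filter_rows_with_target_name.py | generate_name_parts
-- ===== SOURCE A (Python) =====
-- def generate_name_parts(tokens: list[str], min_tokens: int = 2) -> list[str]:
--     """
--     Generate consecutive parts of the name.
--     Example:
--     سالم صباح السالم المبارك الصباح
--     creates:
--     سالم صباح
--     صباح السالم
--     السالم المبارك
--     ...
--     سالم صباح السالم
--     صباح السالم المبارك
--     etc.
--     """
--     parts = []
--
--     n = len(tokens)
--
--     for size in range(n, min_tokens - 1, -1):
--         for start in range(0, n - size + 1):
--             part = " ".join(tokens[start:start + size])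
--             parts.append(part)
--
--     return parts
-- ===== SOURCE B (Python) =====
-- def generate_name_parts(tokens: list[str], min_tokens: int = 2) -> list[str]:
--     """Join the tokens once, record where each token starts, and cut every
--     consecutive part out of the joined string instead of re-joining it."""
--     n = len(tokens)
--     full = " ".join(tokens)
--     # off[i] = character index in full where token i would start; off[n] = len(full) + 1
--     off = [0]
--     pos = 0
--     for t in tokens:
--         pos += len(t) + 1
--         off.append(pos)
--     parts = []
--     for size in range(n, min_tokens - 1, -1):
--         if size < 1:
--             # a window of fewer than one token is empty
--             parts += [""] * (n - size + 1)
--         else: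
--             for start in range(0, n - size + 1):
--                 parts.append(full[off[start] : off[start + size] - 1])
--     return parts
-- ===== Notes on version B (the rewrite author's own statement) =====
-- stated objective: alternative
-- what changed: B joins the tokens into one string once, builds a start-offset table, and extracts every consecutive part as a single slice of the joined string instead of re-joining each window.
-- intended difference: On negative min_tokens with at least two tokens (and not the degenerate two-token list starting with an empty token), A's tokens[start:start+size] hits Python's negative-slice wraparound for window sizes below one token and returns accidental re-joined prefixes such as ' '.join(tokens[0:-1]), while B returns the intended empty string for every empty window; B's value is intended because a window of fewer than one token contains nothing to join. — e.g. on generate_name_parts(["a", "b"], -1): A returns ["a b", "a", "b", "", "", "", "a", "", "", ""], B returns ["a b", "a", "b", "", "", "", "", "", "", ""]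
import Mathlib
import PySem

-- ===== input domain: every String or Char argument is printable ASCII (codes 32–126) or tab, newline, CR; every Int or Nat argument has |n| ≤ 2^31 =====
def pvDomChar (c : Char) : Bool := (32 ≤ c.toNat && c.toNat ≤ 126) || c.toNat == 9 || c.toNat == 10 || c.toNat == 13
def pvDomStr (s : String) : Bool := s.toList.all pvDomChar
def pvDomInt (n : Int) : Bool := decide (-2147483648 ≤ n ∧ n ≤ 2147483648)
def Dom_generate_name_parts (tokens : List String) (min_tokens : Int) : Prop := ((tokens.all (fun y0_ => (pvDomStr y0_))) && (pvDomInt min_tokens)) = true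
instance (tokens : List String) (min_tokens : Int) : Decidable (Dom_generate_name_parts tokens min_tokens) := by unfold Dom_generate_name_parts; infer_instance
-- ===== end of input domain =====

-- B joins the tokens once and cuts every part out of the joined string via a start-offset
-- table instead of re-joining each window (objective: alternative; return value only).

-- ===== PORT A =====
def generate_name_parts (tokens : List String) (min_tokens : Int) : List String :=
  (PySem.List.pyRange (tokens.length : Int) (min_tokens - 1) (-1)).foldl (fun parts size =>
    (PySem.List.pyRange 0 ((tokens.length : Int) - size + 1) 1).foldl (fun parts start =>
      parts ++ [PySem.Str.join " " (PySem.List.slice tokens (some start) (some (start + size)))])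
      parts) []

-- ===== PORT B =====
def generate_name_parts_alt (tokens : List String) (min_tokens : Int) : List String :=
  let full := PySem.Str.join " " tokens
  let off : List Int := (tokens.foldl
    (fun (st : Int × List Int) t =>
      (st.1 + PySem.Str.len t + 1, st.2 ++ [st.1 + PySem.Str.len t + 1]))
    ((0 : Int), ([0] : List Int))).2
  (PySem.List.pyRange (tokens.length : Int) (min_tokens - 1) (-1)).foldl (fun parts size =>
    if size < 1 then
      parts ++ PySem.List.pyRepeat [""] ((tokens.length : Int) - size + 1)
    else
      (PySem.List.pyRange 0 ((tokens.length : Int) - size + 1) 1).foldl (fun parts start =>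
        parts ++ [PySem.Str.slice full (some (PySem.List.pyGetD off start 0))
          (some (PySem.List.pyGetD off (start + size) 0 - 1))]) parts) []

-- ===== PRECONDITION & SPEC =====
-- On negative min_tokens with at least two tokens, A's tokens[start:start+size] hits Python's
-- negative-slice wraparound and returns accidental non-empty re-joined prefixes for the
-- sub-one-token window sizes, while B returns the intended empty string for every window of
-- fewer than one token.
def D_generate_name_parts (tokens : List String) (min_tokens : Int) : Prop :=
  min_tokens < 0 ∧ 2 ≤ tokens.length ∧ (3 ≤ tokens.length ∨ tokens.headD "" ≠ "")
instance (tokens : List String) (min_tokens : Int) : Decidable (D_generate_name_parts tokens min_tokens) := by unfold D_generate_name_parts; infer_instance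

def Spec_generate_name_parts (tokens : List String) (min_tokens : Int) (out : List String) : Prop := ¬ D_generate_name_parts tokens min_tokens → out = generate_name_parts_alt tokens min_tokens
instance (tokens : List String) (min_tokens : Int) (out : List String) : Decidable (Spec_generate_name_parts tokens min_tokens out) := by unfold Spec_generate_name_parts; infer_instance

def pvDiffWitness_generate_name_parts : List String × Int := (["a", "b"], -1)
def pvDiffWitnessOut_generate_name_parts : (List String) × (List String) :=
  (["a b", "a", "b", "", "", "", "a", "", "", ""],
   ["a b", "a", "b", "", "", "", "", "", "", ""])

-- ===== CLAIM (what is proved, stated in full; the proofs are below) =====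
def Claim_unchanged_generate_name_parts : Prop := ∀ (tokens : List String) (min_tokens : Int), Dom_generate_name_parts tokens min_tokens → Spec_generate_name_parts tokens min_tokens (generate_name_parts tokens min_tokens)
def Claim_changed_generate_name_parts : Prop := Dom_generate_name_parts (pvDiffWitness_generate_name_parts.1) (pvDiffWitness_generate_name_parts.2) ∧ D_generate_name_parts (pvDiffWitness_generate_name_parts.1) (pvDiffWitness_generate_name_parts.2) ∧ generate_name_parts (pvDiffWitness_generate_name_parts.1) (pvDiffWitness_generate_name_parts.2) = pvDiffWitnessOut_generate_name_parts.1 ∧ generate_name_parts_alt (pvDiffWitness_generate_name_parts.1) (pvDiffWitness_generate_name_parts.2) = pvDiffWitnessOut_generate_name_parts.2 ∧ pvDiffWitnessOut_generate_name_parts.1 ≠ pvDiffWitnessOut_generate_name_parts.2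

-- ===== LEMMAS AND PROOFS =====

/-- `Soff ls i` = character index at which the `i`-th piece starts in `" ".join`. -/
def Soff (ls : List (List Char)) (i : Nat) : Nat :=
  i + ((ls.take i).map List.length).sum

theorem Soff_zero (ls : List (List Char)) : Soff ls 0 = 0 := by simp [Soff]

theorem Soff_nil (i : Nat) : Soff [] i = i := by simp [Soff]

theorem Soff_cons_succ (t : List Char) (ts : List (List Char)) (a : Nat) :
    Soff (t :: ts) (a + 1) = t.length + 1 + Soff ts a := by
  simp [Soff]; omega

theorem Soff_ge (ls : List (List Char)) (i : Nat) : i ≤ Soff ls i := by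
  simp [Soff]

theorem Soff_add (ls : List (List Char)) (a b : Nat) :
    Soff ls (a + b) = Soff ls a + Soff (ls.drop a) b := by
  simp [Soff, List.take_add]; omega

theorem drop_append_of_le {α : Type} (l₁ l₂ : List α) (n : Nat) (h : l₁.length ≤ n) :
    (l₁ ++ l₂).drop n = l₂.drop (n - l₁.length) := by
  rw [List.drop_append, List.drop_eq_nil_of_le h, List.nil_append]

theorem take_append_of_le {α : Type} (l₁ l₂ : List α) (n : Nat) (h : l₁.length ≤ n) :
    (l₁ ++ l₂).take n = l₁ ++ l₂.take (n - l₁.length) := by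
  rw [List.take_append, List.take_of_length_le h]

theorem drop_join (ls : List (List Char)) (a : Nat) :
    (PySem.Chars.join [' '] ls).drop (Soff ls a) = PySem.Chars.join [' '] (ls.drop a) := by
  induction ls generalizing a with
  | nil => simp [PySem.Chars.join_nil]
  | cons t ts ih =>
    cases a with
    | zero => simp [Soff_zero]
    | succ a =>
      cases ts with
      | nil =>
        rw [PySem.Chars.join_singleton]
        have h1 : Soff [t] (a + 1) = t.length + 1 + a := by
          simp [Soff]; omega
        rw [h1]
        have h2 : List.drop (a + 1) [t] = ([] : List (List Char)) := by
          apply List.drop_eq_nil_of_le; simp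
        rw [h2, PySem.Chars.join_nil]
        apply List.drop_eq_nil_of_le; omega
      | cons q rest =>
        rw [PySem.Chars.join_cons_cons, Soff_cons_succ, List.append_assoc]
        rw [drop_append_of_le _ _ _ (by omega : t.length ≤ t.length + 1 + Soff (q :: rest) a)]
        have h4 : t.length + 1 + Soff (q :: rest) a - t.length = 1 + Soff (q :: rest) a := by omega
        rw [h4]
        rw [drop_append_of_le [' '] _ _ (by simp)]
        have h5 : 1 + Soff (q :: rest) a - List.length [' '] = Soff (q :: rest) a := by
          simp
        rw [h5, ih]
        simp

theorem take_join (ls : List (List Char)) (k : Nat) :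
    (PySem.Chars.join [' '] ls).take (Soff ls (k + 1) - 1) =
      PySem.Chars.join [' '] (ls.take (k + 1)) := by
  induction ls generalizing k with
  | nil => simp [PySem.Chars.join_nil]
  | cons t ts ih =>
    cases k with
    | zero =>
      have h1 : Soff (t :: ts) 1 - 1 = t.length := by
        rw [Soff_cons_succ, Soff_zero]; omega
      rw [h1]
      have h2 : List.take 1 (t :: ts) = [t] := by simp
      rw [h2, PySem.Chars.join_singleton]
      cases ts with
      | nil => rw [PySem.Chars.join_singleton, List.take_of_length_le (le_refl _)]
      | cons q rest =>
        rw [PySem.Chars.join_cons_cons, List.append_assoc]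
        rw [take_append_of_le _ _ _ (le_refl _)]
        simp
    | succ k =>
      cases ts with
      | nil =>
        have h2 : List.take (k + 2) [t] = [t] := by
          apply List.take_of_length_le; simp
        rw [h2, PySem.Chars.join_singleton]
        apply List.take_of_length_le
        have h3 : Soff [t] (k + 2) = t.length + 1 + Soff [] (k + 1) := Soff_cons_succ t [] (k + 1)
        rw [h3, Soff_nil]; omega
      | cons q rest =>
        have hge : k + 1 ≤ Soff (q :: rest) (k + 1) := Soff_ge _ _
        rw [PySem.Chars.join_cons_cons, Soff_cons_succ, List.append_assoc]
        rw [take_append_of_le _ _ _ (by omega : t.length ≤ t.length + 1 + Soff (q :: rest) (k + 1) - 1)]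
        have h5 : t.length + 1 + Soff (q :: rest) (k + 1) - 1 - t.length
            = 1 + (Soff (q :: rest) (k + 1) - 1) := by omega
        rw [h5]
        rw [take_append_of_le [' '] _ _ (by simp)]
        have h7 : 1 + (Soff (q :: rest) (k + 1) - 1) - List.length [' ']
            = Soff (q :: rest) (k + 1) - 1 := by simp
        rw [h7, ih]
        have h8 : List.take (k + 1 + 1) (t :: q :: rest) = t :: List.take (k + 1) (q :: rest) := by
          simp
        rw [h8]
        have h9 : List.take (k + 1) (q :: rest) = q :: List.take k rest := by simp
        rw [h9, PySem.Chars.join_cons_cons, ← h9, List.append_assoc]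

theorem window_join (ls : List (List Char)) (a s : Nat) :
    ((PySem.Chars.join [' '] ls).drop (Soff ls a)).take (Soff ls (a + (s + 1)) - 1 - Soff ls a) =
      PySem.Chars.join [' '] ((ls.drop a).take (s + 1)) := by
  rw [drop_join]
  have h1 : Soff ls (a + (s + 1)) - 1 - Soff ls a = Soff (ls.drop a) (s + 1) - 1 := by
    have := Soff_add ls a (s + 1)
    have := Soff_ge (ls.drop a) (s + 1)
    omega
  rw [h1, take_join]

theorem join_empty_str : PySem.Str.join " " [] = "" := by decide

theorem join_single_str (t : String) : PySem.Str.join " " [t] = t := by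
  apply String.toList_inj.mp
  rw [PySem.Str.toList_join]
  simp [PySem.Chars.join_singleton]

theorem off_foldl (ts : List String) (p : Int) (acc : List Int) :
    ts.foldl (fun (st : Int × List Int) t =>
        (st.1 + PySem.Str.len t + 1, st.2 ++ [st.1 + PySem.Str.len t + 1])) (p, acc)
      = (p + (Soff (ts.map String.toList) ts.length : Nat),
         acc ++ (List.range ts.length).map
           (fun i => p + (Soff (ts.map String.toList) (i + 1) : Nat))) := by
  induction ts generalizing p acc with
  | nil => simp [Soff_nil]
  | cons t ts ih =>
    simp only [List.foldl_cons]
    rw [ih]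
    simp only [Prod.mk.injEq]
    refine ⟨?_, ?_⟩
    · have h1 : Soff ((t :: ts).map String.toList) ((t :: ts).length)
          = t.toList.length + 1 + Soff (ts.map String.toList) ts.length := by
        simp only [List.map_cons, List.length_cons]
        exact Soff_cons_succ _ _ _
      rw [h1, PySem.Str.len_eq]
      push_cast
      ring
    · simp only [List.length_cons, List.range_succ_eq_map, List.map_cons, List.map_map,
        List.append_assoc, List.singleton_append]
      congr 1
      simp only [List.cons.injEq]
      refine ⟨?_, ?_⟩
      · have h0 : Soff (t.toList :: ts.map String.toList) (0 + 1)
            = t.toList.length + 1 + Soff (ts.map String.toList) 0 := Soff_cons_succ _ _ 0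
        rw [h0, Soff_zero, PySem.Str.len_eq]
        push_cast; ring
      · apply List.map_congr_left
        intro i _
        simp only [Function.comp_apply, Nat.succ_eq_add_one]
        have h1 : Soff (t.toList :: ts.map String.toList) (i + 1 + 1)
            = t.toList.length + 1 + Soff (ts.map String.toList) (i + 1) := Soff_cons_succ _ _ _
        rw [h1, PySem.Str.len_eq]
        push_cast; ring

theorem off_eq (tokens : List String) :
    (tokens.foldl (fun (st : Int × List Int) t =>
        (st.1 + PySem.Str.len t + 1, st.2 ++ [st.1 + PySem.Str.len t + 1]))
      ((0 : Int), ([0] : List Int))).2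
    = (List.range (tokens.length + 1)).map
        (fun i => ((Soff (tokens.map String.toList) i : Nat) : Int)) := by
  rw [off_foldl]
  rw [List.range_succ_eq_map, List.map_cons]
  simp only [Soff_zero, Nat.cast_zero, List.map_map, List.singleton_append]
  congr 1
  apply List.map_congr_left
  intro i _
  simp [Function.comp_apply, Nat.succ_eq_add_one]

theorem clampIdx_le_of (n : Nat) (a b : Int) (h0 : 0 ≤ a) (hb : b ≤ a)
    (hneg : b < 0 → (n : Int) + b ≤ a) :
    PySem.List.clampIdx n b ≤ PySem.List.clampIdx n a := by
  simp only [PySem.List.clampIdx]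
  split_ifs <;> omega

theorem slice_eq_nil {α : Type} (xs : List α) (a b : Int)
    (h : PySem.List.clampIdx xs.length b ≤ PySem.List.clampIdx xs.length a) :
    PySem.List.slice xs (some a) (some b) = [] := by
  have hl := PySem.List.length_slice xs a b
  have : (PySem.List.slice xs (some a) (some b)).length = 0 := by omega
  exact List.eq_nil_of_length_eq_zero this

theorem sp_toList : (" " : String).toList = [' '] := by decide

theorem part_eq (tokens : List String) (a s : Nat) :
    PySem.Str.slice (PySem.Str.join " " tokens)
        (some ((Soff (tokens.map String.toList) a : Nat) : Int))
        (some (((Soff (tokens.map String.toList) (a + s + 1) : Nat) : Int) - 1))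
      = PySem.Str.join " " (PySem.List.slice tokens (some (a : Int))
          (some ((a : Int) + ((s : Int) + 1)))) := by
  apply String.toList_inj.mp
  have hb : (((Soff (tokens.map String.toList) (a + s + 1) : Nat)) : Int) - 1
      = (((Soff (tokens.map String.toList) (a + s + 1) - 1 : Nat)) : Int) := by
    have := Soff_ge (tokens.map String.toList) (a + s + 1); omega
  have hcast : ((a : Int) + ((s : Int) + 1)) = (((a + (s + 1) : Nat)) : Int) := by
    push_cast; ring
  rw [hb, hcast]
  rw [PySem.Str.toList_slice, PySem.Str.toList_join, PySem.Str.toList_join, sp_toList]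
  rw [PySem.Chars.slice_eq_listSlice, PySem.List.slice_natCast, PySem.List.slice_natCast]
  rw [List.map_take, List.map_drop]
  have h1 : a + (s + 1) - a = s + 1 := by omega
  rw [h1]
  exact window_join _ a s

theorem main_eq (tokens : List String) (min_tokens : Int)
    (hD : ¬ D_generate_name_parts tokens min_tokens) :
    generate_name_parts tokens min_tokens = generate_name_parts_alt tokens min_tokens := by
  simp only [generate_name_parts, generate_name_parts_alt]
  apply PySem.List.foldl_congr_mem
  intro acc size hsz
  rw [PySem.List.mem_pyRange_neg_one] at hsz
  by_cases h1 : size < 1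
  · rw [if_pos h1]
    rw [PySem.List.foldl_congr_mem _ _
      (fun (parts : List String) (start : Int) => parts ++ [(fun (_ : Int) => "") start]) acc
      ?empty_parts]
    · rw [PySem.List.foldl_append_singleton_eq_map (fun (_ : Int) => "")]
      rw [PySem.List.pyRepeat_singleton, List.map_const']
      rw [PySem.List.length_pyRange_one,
        show (↑tokens.length - size + 1 - 0 : Int) = ↑tokens.length - size + 1 from by ring]
    case empty_parts =>
      intro acc2 start hst
      rw [PySem.List.mem_pyRange_one] at hst
      suffices h : PySem.Str.join " "
          (PySem.List.slice tokens (some start) (some (start + size))) = "" by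
        rw [h]
      by_cases hsz0 : size = 0
      · subst hsz0
        rw [show start + (0 : Int) = start by ring]
        rw [slice_eq_nil tokens start start (le_refl _)]
        exact join_empty_str
      · have hsneg : size ≤ -1 := by omega
        have hm : min_tokens < 0 := by omega
        have hcase : tokens.length ≤ 1 ∨ (tokens.length = 2 ∧ tokens.headD "" = "") := by
          by_contra hc
          push Not at hc
          apply hD
          refine ⟨hm, by omega, ?_⟩
          by_cases h3 : 3 ≤ tokens.length
          · exact Or.inl h3
          · exact Or.inr (hc.2 (by omega))
        rcases hcase with hlen | ⟨hlen, hhead⟩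
        · rw [slice_eq_nil tokens start (start + size)
            (clampIdx_le_of _ _ _ hst.1 (by omega) (by intro _; omega))]
          exact join_empty_str
        · by_cases hw : size = -1 ∧ start = 0
          · obtain ⟨hw1, hw2⟩ := hw
            subst hw1; subst hw2
            rw [show (0 : Int) + -1 = -1 by ring]
            rw [PySem.List.slice_zero_start, PySem.List.slice_to_neg_one]
            have hdl : tokens.dropLast = [tokens.headD ""] := by
              rcases tokens with _ | ⟨x, _ | ⟨y, _ | _⟩⟩ <;> simp_all
            rw [hdl, hhead, join_single_str]
          · rw [slice_eq_nil tokens start (start + size)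
              (clampIdx_le_of _ _ _ hst.1 (by omega) ?_)]
            · exact join_empty_str
            · intro hbneg
              rw [hlen]
              by_cases hs1 : size = -1
              · have : start ≠ 0 := fun h => hw ⟨hs1, h⟩
                omega
              · omega
  · rw [if_neg h1]
    apply PySem.List.foldl_congr_mem
    intro acc2 start hst
    rw [PySem.List.mem_pyRange_one] at hst
    rw [off_eq]
    have ha : start = ((start.toNat : Nat) : Int) := (Int.toNat_of_nonneg hst.1).symm
    have hk : size = (((size.toNat - 1 : Nat) : Int) + 1) := by omega
    rw [ha, hk]
    have hsum : (((start.toNat : Nat) : Int) + (((size.toNat - 1 : Nat) : Int) + 1))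
        = ((start.toNat + (size.toNat - 1) + 1 : Nat) : Int) := by push_cast; ring
    rw [hsum]
    rw [PySem.List.pyGetD_natCast, PySem.List.pyGetD_natCast]
    rw [PySem.List.getD_map_range _ _ _ _ (by omega : start.toNat < tokens.length + 1)]
    rw [PySem.List.getD_map_range _ _ _ _
      (by omega : start.toNat + (size.toNat - 1) + 1 < tokens.length + 1)]
    rw [part_eq tokens start.toNat (size.toNat - 1), hsum]

-- ===== VERDICT (by name: the statement is the Claim_ definition above) =====
theorem generate_name_parts_spec : Claim_unchanged_generate_name_parts := by
  intro tokens m _ hD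
  exact main_eq tokens m hD

theorem generate_name_parts_changed : Claim_changed_generate_name_parts := by
  unfold Claim_changed_generate_name_parts; decide
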